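-- pv_equiv track=rewrite | github.com/Moana63/Algogo | sort_functions.py | indexation_minimisers
-- ===== SOURCE A (Python) =====
-- from collections import Counter
-- from itertools import product, chain
--
-- def frequency_minimizer(read: str, seed_size: int, len_window: int) -> dict:
--     """Returns the frequency of minimisers per read
--
--     Parameters
--     ----------
--     read : str
--         a DNA read
--     seed_size : int
--         size of the minimiser
--     len_window : int, optional
--         length of the window sliding on the sequence, by default 10
--
--     Returns
--     -------
--     dict
--         a dictionnary containing the minimisers encountered in the sequence as key and their number of occurences as values
--     """
--     list_minimisers = list()
--     i = 0
--     while i < (len(read)-len_window+1):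
--         minimiser = min([(read[i+j: i+j+seed_size], j)
--                         for j in range(len_window-seed_size+1)])
--         list_minimisers.append(minimiser[0])
--         # we jump to the next window not containing the last minimiser encountered, to reduce computation time
--         i += minimiser[1] + 1
--     return Counter(list_minimisers)
--
-- def binary_minimisers(dico: dict, list_xmers: list) -> str:
--     """Take the proportions of each possible minimisers in the sequence and returns a sequence of 0 and 1.
--     For each minimisers proportion, if the minimiser is present, a 1 is added to the sequence. Else, a 0 is added.
--
--     Parameters
--     ----------
--     dico : dict
--         a dictionnary containing the proportions of each different minimisers encountered in a sequence.
--     list_xmers : list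
--         the list of all possible minimisers
--
--     Returns
--     -------
--     str
--         the sequence of 0 and 1 as a simplification of the presence and absence of minimisers
--     """
--
--     binary_seq = str()
--     for kmer in list_xmers:
--         if kmer in dico.keys():
--             binary_seq += "1"
--         else:
--             binary_seq += "0"
--     return binary_seq
--
-- def indexation_minimisers(list_seq: list, seed_size: int, len_window: int = 33) -> dict:
--     """Index all the read sequences from the fasta file according to their identifier.
--     The identifier is a sequence of 0 and 1 linked to the presence of different minimisers in the read sequence.
--
--     Parameters
--     ----------
--     list_seq : list
--         a list containing all the read sequence from the fasta file
--     seed_size : int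
--        the size of the minimiser
--
--     Returns
--     -------
--     dict
--         an index with the identifier sequence of 0 and 1 as key and a list of the indexes in list_seq of the corresponding reads as values.
--     """
--     index = dict()
--     list_xmers = sorted(["".join(tuples)
--                          for tuples in list(product('ATCG', repeat=seed_size))])
--     for i, read in enumerate(list_seq):
--         dico = frequency_minimizer(read, seed_size, len_window)
--         binary_seq = binary_minimisers(dico, list_xmers)
--         if binary_seq in index:
--             index[binary_seq] += [i]
--         else:
--             index[binary_seq] = [i]
--     return index
-- ===== SOURCE B (Python) =====
-- def indexation_minimisers(list_seq: list, seed_size: int, len_window: int = 33) -> dict: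
--     """Same index; minimisers are extracted with an amortised monotone-deque sliding
--     minimum instead of rescanning every window, and the sorted k-mer alphabet is
--     generated directly in order by recursion instead of sorted(product(...))."""
--     kmers = _pv_kmers(seed_size)
--     index = {}
--     for i, read in enumerate(list_seq):
--         present = set(_pv_minimisers(read, seed_size, len_window))
--         key = "".join("1" if k in present else "0" for k in kmers)
--         index.setdefault(key, []).append(i)
--     return index
--
--
-- def _pv_kmers(s):
--     # all length-s words over ACGT, generated directly in sorted order
--     if s <= 0:
--         return [""]
--     return [c + t for c in "ACGT" for t in _pv_kmers(s - 1)]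
--
--
-- def _pv_minimisers(read, seed_size, len_window):
--     # monotone deque: positions with non-decreasing substrings; front = leftmost
--     # minimal k-mer of the current window; jump past it as the original does
--     cnt = len_window - seed_size + 1
--     limit = len(read) - len_window + 1
--     mins, dq, hi, pos = [], [], -1, 0
--     while pos < limit:
--         target = pos + cnt - 1
--         while hi < target:
--             hi += 1
--             s = read[hi:hi + seed_size]
--             while dq and read[dq[-1]:dq[-1] + seed_size] > s:
--                 dq.pop()
--             dq.append(hi)
--         m = dq.pop(0)
--         mins.append(read[m:m + seed_size])
--         pos = m + 1
--     return mins
-- ===== Notes on version B (the rewrite author's own statement) =====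
-- stated objective: alternative
-- what changed: Minimisers are extracted with a monotone-deque amortised sliding-window minimum whose state is reused across the jumping windows, instead of materialising and min()-ing a fresh list of (substring, offset) tuples for every window; the sorted k-mer alphabet is generated directly in lexicographic order by recursion instead of sorting the output of itertools.product, and presence keys are tested against a set of the minimisers.
import Mathlib
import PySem

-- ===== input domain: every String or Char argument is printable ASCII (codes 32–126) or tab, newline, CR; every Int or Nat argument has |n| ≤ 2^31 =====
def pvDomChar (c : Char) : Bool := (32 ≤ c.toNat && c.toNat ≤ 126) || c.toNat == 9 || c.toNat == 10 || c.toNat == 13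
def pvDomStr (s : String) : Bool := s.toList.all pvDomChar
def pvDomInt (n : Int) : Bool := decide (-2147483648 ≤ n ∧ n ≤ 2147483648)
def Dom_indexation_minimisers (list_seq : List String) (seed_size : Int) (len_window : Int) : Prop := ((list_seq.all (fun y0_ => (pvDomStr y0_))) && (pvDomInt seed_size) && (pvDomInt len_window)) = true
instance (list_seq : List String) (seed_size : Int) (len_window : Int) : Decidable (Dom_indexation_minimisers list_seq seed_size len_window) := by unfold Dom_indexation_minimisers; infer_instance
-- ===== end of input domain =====

-- B extracts the minimisers with a monotone-deque amortised sliding-window minimum reused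
-- across the jumping windows, and generates the sorted k-mer alphabet directly in
-- lexicographic order by recursion instead of sorting itertools.product; same result.

-- ===== PORT A =====
-- the list [(read[i+j : i+j+seed_size], j) for j in range(cnt)]; Python's min on these
-- (string, int) tuples is PySem.List.min2? with the two projections as keys
def pvWindows (read : String) (seed_size : Int) (i : Int) (cnt : Int) : List (String × Int) :=
  (PySem.List.pyRange 0 cnt 1).map
    (fun j => (PySem.Str.slice read (some (i + j)) (some (i + j + seed_size)), j))

-- the while-loop of frequency_minimizer; the fuel only makes it total: i strictly increases
-- each iteration, so (len(read)-len_window+1).toNat units are enough and the fuel never runs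
-- out while the Python loop would still run.  min2? = none is Python's min([]) ValueError
-- (excluded by Pre_); the loop stops there.
def pvFreqLoop (read : String) (seed_size len_window : Int) :
    Nat → Int → List String → List String
  | 0, _, acc => acc
  | fuel + 1, i, acc =>
    if i < PySem.Str.len read - len_window + 1 then
      match PySem.List.min2? (pvWindows read seed_size i (len_window - seed_size + 1))
          Prod.fst Prod.snd with
      | none => acc
      | some m => pvFreqLoop read seed_size len_window fuel (i + m.2 + 1) (acc ++ [m.1])
    else acc

def frequency_minimizer (read : String) (seed_size len_window : Int) : PySem.Dict String Int :=
  PySem.Dict.counter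
    (pvFreqLoop read seed_size len_window (PySem.Str.len read - len_window + 1).toNat 0 [])

-- product('ATCG', repeat=seed_size): tuples of characters, first coordinate outermost;
-- ''.join over a tuple of single characters is exactly String.ofList of the char list.
-- .toNat is exact for 0 ≤ seed_size; a negative repeat raises ValueError in Python (outside Pre_).
def pvProduct : Nat → List (List Char)
  | 0 => [[]]
  | n + 1 => ['A', 'T', 'C', 'G'].flatMap (fun c => (pvProduct n).map (c :: ·))

-- sorted(...) on this duplicate-free list is ported as Lean's stable List.mergeSort:
-- the same value (proved in pvListXmers_eq below); PySem's kernel-reducible insertion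
-- sort cannot be evaluated at the 4^seed_size list sizes this function builds.
def pvListXmers (seed_size : Int) : List String :=
  List.mergeSort ((pvProduct seed_size.toNat).map (fun t => String.ofList t))
    (fun a b => decide (a ≤ b))

-- binary_seq += "1"/"0": appending one character to a Python str is String.push — exact
def binary_minimisers (dico : PySem.Dict String Int) (list_xmers : List String) : String :=
  list_xmers.foldl
    (fun acc kmer =>
      if (PySem.Dict.keys dico).contains kmer then acc.push '1' else acc.push '0')
    ""


def indexation_minimisers (list_seq : List String) (seed_size : Int) (len_window : Int) :
    List (String × List Int) :=
  let list_xmers := pvListXmers seed_size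
  (((PySem.List.enumerate list_seq 0).foldl
    (fun index p =>
      let dico := frequency_minimizer p.2 seed_size len_window
      let binary_seq := binary_minimisers dico list_xmers
      match index.get? binary_seq with
      | some v => index.insert binary_seq (v ++ [p.1])
      | none => index.insert binary_seq [p.1])
    PySem.Dict.empty) : PySem.Dict String (List Int)).items

-- ===== PORT B =====
-- read[p : p+seed_size]
def pvSubs (read : String) (seed_size p : Int) : String :=
  PySem.Str.slice read (some p) (some (p + seed_size))

-- 'while dq and read[dq[-1]:dq[-1]+seed_size] > s: dq.pop(); dq.append(q)' — the pops from
-- the back of the list are the dropWhile on its reverse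
def pvPush (read : String) (seed_size : Int) (dq : List Int) (q : Int) : List Int :=
  (dq.reverse.dropWhile (fun p => decide (pvSubs read seed_size q < pvSubs read seed_size p))).reverse
    ++ [q]

-- 'while hi < target: hi += 1; push(hi)'; fuel (target-hi).toNat is exact: hi rises by 1 a step
def pvFill (read : String) (seed_size target : Int) :
    Nat → List Int → Int → List Int × Int
  | 0, dq, hi => (dq, hi)
  | fuel + 1, dq, hi =>
    if hi < target then
      pvFill read seed_size target fuel (pvPush read seed_size dq (hi + 1)) (hi + 1)
    else (dq, hi)

-- the outer while of _pv_minimisers; 'm = dq.pop(0)' on an empty deque is Python's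
-- IndexError (only reachable outside Pre_) — the loop stops there
def pvDeqLoop (read : String) (seed_size len_window : Int) :
    Nat → Int → List Int → Int → List String → List String
  | 0, _, _, _, mins => mins
  | fuel + 1, pos, dq, hi, mins =>
    if pos < PySem.Str.len read - len_window + 1 then
      match pvFill read seed_size (pos + (len_window - seed_size + 1) - 1)
          ((pos + (len_window - seed_size + 1) - 1) - hi).toNat dq hi with
      | ([], _) => mins
      | (m :: rest, hi') =>
        pvDeqLoop read seed_size len_window fuel (m + 1) rest hi'
          (mins ++ [pvSubs read seed_size m])
    else mins

-- _pv_kmers: all length-s ACGT words generated directly in sorted order ('c + t' string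
-- concatenation is modelled on the char-list side, materialised by String.ofList — exact);
-- 's <= 0 → [""]' is the .toNat = 0 case
def pvKmersL : Nat → List (List Char)
  | 0 => [[]]
  | n + 1 => ['A', 'C', 'G', 'T'].flatMap (fun c => (pvKmersL n).map (c :: ·))

def indexation_minimisers_alt (list_seq : List String) (seed_size : Int) (len_window : Int) :
    List (String × List Int) :=
  let kmers := (pvKmersL seed_size.toNat).map (fun t => String.ofList t)
  (((PySem.List.enumerate list_seq 0).foldl
    (fun index p =>
      let present := PySem.Set.ofList
        (pvDeqLoop p.2 seed_size len_window (PySem.Str.len p.2 - len_window + 1).toNat 0 [] (-1) [])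
      let key := String.ofList
        (kmers.map (fun k => if PySem.Set.contains present k then '1' else '0'))
      -- index.setdefault(key, []).append(i): the entry becomes its old value (default []) ++ [i]
      index.insert key (index.getD key [] ++ [p.1]))
    PySem.Dict.empty) : PySem.Dict String (List Int)).items

-- ===== PRECONDITION & SPEC =====
-- Pre_ excludes exactly the inputs where the Python A raises ValueError: a negative
-- seed_size (product(..., repeat=seed_size)), and seed_size > len_window while some read
-- is long enough to enter the window loop (min of an empty window list).
def Pre_indexation_minimisers (list_seq : List String) (seed_size : Int) (len_window : Int) : Prop :=
  0 ≤ seed_size ∧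
    (seed_size ≤ len_window ∨ ∀ r ∈ list_seq, PySem.Str.len r < len_window)
instance (list_seq : List String) (seed_size : Int) (len_window : Int) :
    Decidable (Pre_indexation_minimisers list_seq seed_size len_window) := by
  unfold Pre_indexation_minimisers; infer_instance

def pvWitness_indexation_minimisers : List String × Int × Int := (["ACGTAC", "AANCG"], 1, 3)

def Spec_indexation_minimisers (list_seq : List String) (seed_size : Int) (len_window : Int)
    (out : List (String × List Int)) : Prop :=
  out = indexation_minimisers_alt list_seq seed_size len_window
instance (list_seq : List String) (seed_size : Int) (len_window : Int)
    (out : List (String × List Int)) :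
    Decidable (Spec_indexation_minimisers list_seq seed_size len_window out) := by
  unfold Spec_indexation_minimisers; infer_instance

-- ===== CLAIM (what is proved, stated in full; the proofs are below) =====
def Claim_equal_indexation_minimisers : Prop :=
  ∀ (list_seq : List String) (seed_size : Int) (len_window : Int),
    Dom_indexation_minimisers list_seq seed_size len_window →
    Pre_indexation_minimisers list_seq seed_size len_window →
    Spec_indexation_minimisers list_seq seed_size len_window
      (indexation_minimisers list_seq seed_size len_window)

-- ===== LEMMAS AND PROOFS =====

-- ---------- the sorted k-mer alphabet ----------

theorem pvKmersL_perm (n : Nat) : (pvProduct n).Perm (pvKmersL n) := by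
  induction n with
  | zero => simp [pvProduct, pvKmersL]
  | succ n ih =>
    have h1 : (pvProduct (n+1)).Perm
        (['A', 'T', 'C', 'G'].flatMap (fun c => (pvKmersL n).map (c :: ·))) := by
      exact List.Perm.flatMap_left _ (fun a _ => ih.map _)
    refine h1.trans ?_
    simp only [pvKmersL, List.flatMap_cons, List.flatMap_nil, List.append_nil]
    have := List.perm_append_comm (l₁ := (pvKmersL n).map ('T' :: ·))
      (l₂ := (pvKmersL n).map ('C' :: ·) ++ (pvKmersL n).map ('G' :: ·))
    refine List.Perm.append_left _ ?_
    simpa [List.append_assoc] using this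

theorem pv_cons_lt_cons (c : Char) (w1 w2 : List Char)
    (h : String.ofList w1 < String.ofList w2) :
    String.ofList (c :: w1) < String.ofList (c :: w2) := by
  rw [String.lt_iff_toList_lt] at h ⊢
  simp only [String.toList_ofList] at h ⊢
  exact List.cons_lt_cons_iff.2 (Or.inr ⟨rfl, h⟩)

theorem pv_cons_lt_cons_of_lt (c1 c2 : Char) (w1 w2 : List Char) (h : c1 < c2) :
    String.ofList (c1 :: w1) < String.ofList (c2 :: w2) := by
  rw [String.lt_iff_toList_lt]
  simp only [String.toList_ofList]
  exact List.cons_lt_cons_iff.2 (Or.inl h)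

theorem pvKmersL_pairwise (n : Nat) :
    (((pvKmersL n).map String.ofList).Pairwise (· < ·)) := by
  induction n with
  | zero => simp [pvKmersL]
  | succ n ih =>
    have ih' : (pvKmersL n).Pairwise (fun w1 w2 => String.ofList w1 < String.ofList w2) :=
      (List.pairwise_map).1 ih
    have hg : ∀ c : Char, (((pvKmersL n).map (c :: ·)).map String.ofList).Pairwise (· < ·) := by
      intro c
      rw [List.map_map, List.pairwise_map]
      exact ih'.imp (fun h => pv_cons_lt_cons c _ _ h)
    have hcross : ∀ (c1 c2 : Char), c1 < c2 →
        ∀ a ∈ ((pvKmersL n).map (c1 :: ·)).map String.ofList,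
        ∀ b ∈ ((pvKmersL n).map (c2 :: ·)).map String.ofList, a < b := by
      intro c1 c2 hc a ha b hb
      simp only [List.map_map, List.mem_map] at ha hb
      obtain ⟨w1, _, rfl⟩ := ha; obtain ⟨w2, _, rfl⟩ := hb
      exact pv_cons_lt_cons_of_lt c1 c2 w1 w2 hc
    simp only [pvKmersL, List.flatMap_cons, List.flatMap_nil, List.append_nil, List.map_append]
    rw [List.pairwise_append, List.pairwise_append, List.pairwise_append]
    refine ⟨hg 'A', ⟨hg 'C', ⟨hg 'G', hg 'T', hcross 'G' 'T' (by decide)⟩, ?_⟩, ?_⟩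
    · intro a ha b hb
      rcases List.mem_append.1 hb with hb | hb
      · exact hcross 'C' 'G' (by decide) a ha b hb
      · exact hcross 'C' 'T' (by decide) a ha b hb
    · intro a ha b hb
      rcases List.mem_append.1 hb with hb | hb
      · exact hcross 'A' 'C' (by decide) a ha b hb
      rcases List.mem_append.1 hb with hb | hb
      · exact hcross 'A' 'G' (by decide) a ha b hb
      · exact hcross 'A' 'T' (by decide) a ha b hb

theorem pvListXmers_eq (seed_size : Int) :
    pvListXmers seed_size = (pvKmersL seed_size.toNat).map String.ofList := by
  refine List.Perm.eq_of_pairwise (le := (· ≤ · : String → String → Prop))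
    (fun a b _ _ h1 h2 => le_antisymm h1 h2) ?_ ?_
    (((List.mergeSort_perm _ _).trans ((pvKmersL_perm seed_size.toNat).map _)))
  · have htot : ∀ (a b : String), (decide (a ≤ b) || decide (b ≤ a)) = true := by
      intro a b
      rcases le_total a b with h | h
      · simp [h]
      · simp [h]
    have htr : ∀ (a b c : String), decide (a ≤ b) = true → decide (b ≤ c) = true →
        decide (a ≤ c) = true := fun a b c hab hbc =>
      decide_eq_true (le_trans (of_decide_eq_true hab) (of_decide_eq_true hbc))
    exact (List.pairwise_mergeSort (le := fun a b : String => decide (a ≤ b)) htr htot _).imp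
      (fun h => of_decide_eq_true h)
  · exact (pvKmersL_pairwise seed_size.toNat).imp le_of_lt

-- ---------- A's membership fold as a map ----------

theorem pv_foldl_push {α : Type} (f : α → Char) :
    ∀ (l : List α) (s : String),
      l.foldl (fun acc k => acc.push (f k)) s = String.ofList (s.toList ++ l.map f) := by
  intro l
  induction l with
  | nil => intro s; simp [String.ofList_toList]
  | cons x t ih =>
    intro s
    rw [List.foldl_cons, ih, String.toList_push]
    simp

theorem pv_binary_eq (ms : List String) (xm : List String) :
    binary_minimisers (PySem.Dict.counter ms) xm
      = String.ofList (xm.map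
          (fun k => if PySem.Set.contains (PySem.Set.ofList ms) k then '1' else '0')) := by
  unfold binary_minimisers
  rw [PySem.List.foldl_congr_mem _ _
      (fun acc kmer =>
        acc.push (if PySem.Set.contains (PySem.Set.ofList ms) kmer then '1' else '0')) _ ?_]
  · rw [pv_foldl_push]; simp
  · intro acc x _
    rw [PySem.Dict.keys_counter]
    by_cases h : PySem.Set.contains (PySem.Set.ofList ms) x
    · simp [PySem.Set.contains] at h ⊢; simp [h]
    · simp [PySem.Set.contains] at h ⊢; simp [h]

-- ---------- the deque characterisation ----------

def pvGood (read : String) (seed hi p : Int) : Bool :=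
  (PySem.List.pyRange (p + 1) (hi + 1) 1).all
    (fun q => decide (pvSubs read seed p ≤ pvSubs read seed q))

def pvCand (read : String) (seed hi : Int) : List Int :=
  (PySem.List.pyRange 0 (hi + 1) 1).filter (pvGood read seed hi)

def pvDl (read : String) (seed pos hi : Int) : List Int :=
  (pvCand read seed hi).filter (fun p => decide (pos ≤ p))

theorem pvGood_iff (read : String) (seed hi p : Int) :
    pvGood read seed hi p = true ↔
      ∀ q, p < q → q ≤ hi → pvSubs read seed p ≤ pvSubs read seed q := by
  simp only [pvGood, List.all_eq_true, PySem.List.mem_pyRange_one, decide_eq_true_eq]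
  constructor
  · intro h q h1 h2; exact h q ⟨by omega, by omega⟩
  · intro h q hq; exact h q (by omega) (by omega)

theorem pv_mem_cand (read : String) (seed hi p : Int) :
    p ∈ pvCand read seed hi ↔ 0 ≤ p ∧ p ≤ hi ∧ pvGood read seed hi p = true := by
  simp only [pvCand, List.mem_filter, PySem.List.mem_pyRange_one]
  constructor
  · rintro ⟨⟨h1, h2⟩, h3⟩; exact ⟨h1, by omega, h3⟩
  · rintro ⟨h1, h2, h3⟩; exact ⟨⟨h1, by omega⟩, h3⟩

theorem pv_mem_dl (read : String) (seed pos hi p : Int) :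
    p ∈ pvDl read seed pos hi ↔
      0 ≤ p ∧ p ≤ hi ∧ pos ≤ p ∧ pvGood read seed hi p = true := by
  simp only [pvDl, List.mem_filter, pv_mem_cand, decide_eq_true_eq]
  tauto

theorem pvDl_lt (read : String) (seed pos hi : Int) :
    (pvDl read seed pos hi).Pairwise (· < ·) :=
  ((PySem.List.pairwise_lt_pyRange_one 0 (hi + 1)).filter _).filter _

theorem pvDl_mono (read : String) (seed pos hi : Int) :
    (pvDl read seed pos hi).Pairwise
      (fun a b => pvSubs read seed a ≤ pvSubs read seed b) := by
  have h := (pvDl_lt read seed pos hi)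
  rw [List.pairwise_iff_forall_sublist] at h ⊢
  intro a b hs
  have ha := (pv_mem_dl read seed pos hi a).1 (hs.subset (by simp))
  have hb := (pv_mem_dl read seed pos hi b).1 (hs.subset (by simp))
  exact (pvGood_iff read seed hi a).1 ha.2.2.2 b (h hs) hb.2.1

theorem pvGood_succ (read : String) (seed hi p : Int) (hp : p ≤ hi) :
    pvGood read seed (hi + 1) p
      = (pvGood read seed hi p && decide (pvSubs read seed p ≤ pvSubs read seed (hi + 1))) := by
  by_cases h : pvGood read seed (hi + 1) p = true
  · have h' := (pvGood_iff read seed (hi + 1) p).1 h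
    have h1 : pvGood read seed hi p = true :=
      (pvGood_iff read seed hi p).2 (fun q hq1 hq2 => h' q hq1 (by omega))
    have h2 : pvSubs read seed p ≤ pvSubs read seed (hi + 1) := h' (hi + 1) (by omega) le_rfl
    simp [h, h1, h2]
  · have h' : pvGood read seed (hi + 1) p = false := by
      rwa [Bool.not_eq_true] at h
    rw [h']
    symm
    by_contra hc
    rw [Bool.not_eq_false, Bool.and_eq_true, decide_eq_true_eq] at hc
    apply h
    refine (pvGood_iff read seed (hi + 1) p).2 (fun q h1 h2 => ?_)
    by_cases hq : q ≤ hi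
    · exact (pvGood_iff read seed hi p).1 hc.1 q h1 hq
    · have hq1 : q = hi + 1 := by omega
      exact hq1 ▸ hc.2

theorem pvGood_self (read : String) (seed hi : Int) : pvGood read seed hi hi = true := by
  rw [pvGood_iff]; intro q h1 h2; omega

theorem pvCand_succ (read : String) (seed hi : Int) (h1 : -1 ≤ hi) :
    pvCand read seed (hi + 1)
      = (pvCand read seed hi).filter
          (fun p => decide (pvSubs read seed p ≤ pvSubs read seed (hi + 1))) ++ [hi + 1] := by
  unfold pvCand
  rw [PySem.List.pyRange_one_succ_right (by omega : (0:Int) ≤ hi + 1), List.filter_append]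
  congr 1
  · rw [List.filter_filter]
    apply List.filter_congr
    intro p hp
    have hple : p ≤ hi := by
      have := PySem.List.mem_pyRange_one.1 hp; omega
    rw [pvGood_succ read seed hi p hple, Bool.and_comm]
  · simp [pvGood_self]

theorem pvDl_succ (read : String) (seed pos hi : Int) (h1 : -1 ≤ hi) (h2 : pos ≤ hi + 1) :
    pvDl read seed pos (hi + 1)
      = (pvDl read seed pos hi).filter
          (fun p => decide (pvSubs read seed p ≤ pvSubs read seed (hi + 1))) ++ [hi + 1] := by
  unfold pvDl
  rw [pvCand_succ read seed hi h1, List.filter_append, List.filter_filter, List.filter_filter]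
  congr 1
  · apply List.filter_congr
    intro p _
    rw [Bool.and_comm]
  · simp [h2]

-- reverse-dropWhile of a suffix-closed predicate is filter of its negation
theorem pv_revDropWhile {α : Type} (P : α → Bool) :
    ∀ (l : List α), l.Pairwise (fun a b => P a = true → P b = true) →
      (l.reverse.dropWhile P).reverse = l.filter (fun x => !P x) := by
  intro l hl
  induction l with
  | nil => simp
  | cons x t ih =>
    have hfa : ∀ b ∈ t, P x = true → P b = true := (List.pairwise_cons.1 hl).1
    have ht := ih (List.pairwise_cons.1 hl).2
    by_cases hx : P x = true
    · have hall : ∀ b ∈ t.reverse, P b = true := by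
        intro b hb; exact hfa b (List.mem_reverse.1 hb) hx
      have hdrop : t.reverse.dropWhile P = [] := List.dropWhile_eq_nil_iff.2 hall
      have hfil : t.filter (fun y => !P y) = [] := by
        rw [List.filter_eq_nil_iff]
        intro b hb
        simp [hfa b hb hx]
      simp [List.reverse_cons, List.dropWhile_append, hdrop, hx, hfil]
    · have hx' : P x = false := by rwa [Bool.not_eq_true] at hx
      rw [List.reverse_cons, List.dropWhile_append]
      by_cases hd : (t.reverse.dropWhile P).isEmpty = true
      · have hnil : t.reverse.dropWhile P = [] := by
          rwa [List.isEmpty_iff] at hd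
        have hfil : t.filter (fun y => !P y) = [] := by
          rw [List.filter_eq_nil_iff]
          intro b hb
          have := List.dropWhile_eq_nil_iff.1 hnil b (List.mem_reverse.2 hb)
          simp [this]
        simp [hd, hx', hfil]
      · rw [if_neg hd]
        simp only [List.reverse_append, List.reverse_cons, List.reverse_nil, List.nil_append,
          List.filter_cons, hx']
        simp only [Bool.not_false, if_true]
        rw [← ht]
        rfl

theorem pvPush_dl (read : String) (seed pos hi : Int) (h1 : -1 ≤ hi) (h2 : pos ≤ hi + 1) :
    pvPush read seed (pvDl read seed pos hi) (hi + 1) = pvDl read seed pos (hi + 1) := by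
  unfold pvPush
  have hpair : (pvDl read seed pos hi).Pairwise
      (fun a b => decide (pvSubs read seed (hi + 1) < pvSubs read seed a) = true →
        decide (pvSubs read seed (hi + 1) < pvSubs read seed b) = true) := by
    refine (pvDl_mono read seed pos hi).imp ?_
    intro a b hab ha
    rw [decide_eq_true_eq] at ha ⊢
    exact lt_of_lt_of_le ha hab
  rw [pv_revDropWhile _ _ hpair, pvDl_succ read seed pos hi h1 h2]
  congr 1
  apply List.filter_congr
  intro p _
  by_cases h : pvSubs read seed p ≤ pvSubs read seed (hi + 1)
  · have h2' : ¬ (pvSubs read seed (hi + 1) < pvSubs read seed p) := not_lt.2 h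
    simp only [h, h2', decide_true, decide_false, Bool.not_false]
  · have h2' : pvSubs read seed (hi + 1) < pvSubs read seed p := not_le.1 h
    simp only [h, h2', decide_true, decide_false, Bool.not_true]

theorem pvFill_dl (read : String) (seed target pos : Int) :
    ∀ (k : Nat) (hi : Int) (dq : List Int), hi ≤ target → (target - hi).toNat = k →
      dq = pvDl read seed pos hi → -1 ≤ hi → pos ≤ hi + 1 →
      pvFill read seed target k dq hi = (pvDl read seed pos target, target) := by
  intro k
  induction k with
  | zero =>
    intro hi dq hle hk hdq _ _
    have : hi = target := by omega
    subst this
    simp [pvFill, hdq]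
  | succ k ih =>
    intro hi dq hle hk hdq hm1 hpos
    have hlt : hi < target := by omega
    simp only [pvFill, if_pos hlt]
    rw [hdq, pvPush_dl read seed pos hi hm1 hpos]
    exact ih (hi + 1) _ (by omega) (by omega) rfl (by omega) (by omega)

theorem pv_strict_left (read : String) (seed pos hi m : Int) (rest : List Int)
    (h0 : 0 ≤ pos) (hd : pvDl read seed pos hi = m :: rest) :
    ∀ q, pos ≤ q → q < m → pvSubs read seed m < pvSubs read seed q := by
  have hm := (pv_mem_dl read seed pos hi m).1 (by rw [hd]; simp)
  have hrest : ∀ b ∈ rest, m < b := by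
    have := hd ▸ pvDl_lt read seed pos hi
    exact (List.pairwise_cons.1 this).1
  suffices H : ∀ k : Nat, ∀ q, (m - q).toNat ≤ k → pos ≤ q → q < m →
      pvSubs read seed m < pvSubs read seed q from
    fun q h1 h2 => H (m - q).toNat q le_rfl h1 h2
  intro k
  induction k with
  | zero => intro q hk h1 h2; omega
  | succ k ih =>
    intro q hk h1 h2
    have hnot : q ∉ pvDl read seed pos hi := by
      intro hmem
      rw [hd, List.mem_cons] at hmem
      rcases hmem with rfl | hmem
      · omega
      · exact absurd (hrest q hmem) (by omega)
    have hng : ¬ pvGood read seed hi q = true := by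
      intro hg
      exact hnot ((pv_mem_dl read seed pos hi q).2 ⟨by omega, by omega, h1, hg⟩)
    rw [pvGood_iff] at hng
    push Not at hng
    obtain ⟨t, ht1, ht2, ht3'⟩ := hng
    rcases lt_trichotomy m t with hmt | hmt | hmt
    · exact lt_of_le_of_lt ((pvGood_iff read seed hi m).1 hm.2.2.2 t hmt ht2) ht3'
    · exact hmt ▸ ht3'
    · exact lt_trans (ih t (by omega) (by omega) hmt) ht3'

theorem pvDl_pop (read : String) (seed pos hi m : Int) (rest : List Int)
    (hd : pvDl read seed pos hi = m :: rest) :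
    rest = pvDl read seed (m + 1) hi := by
  have hm := (pv_mem_dl read seed pos hi m).1 (by rw [hd]; simp)
  have hrest : ∀ b ∈ rest, m < b := by
    have := hd ▸ pvDl_lt read seed pos hi
    exact (List.pairwise_cons.1 this).1
  have hstep : ∀ p ∈ pvCand read seed hi,
      decide ((m + 1 : Int) ≤ p) = (decide ((m + 1 : Int) ≤ p) && decide (pos ≤ p)) := by
    intro p _
    by_cases h : (m + 1 : Int) ≤ p
    · have hp : pos ≤ p := by have := hm.2.2.1; omega
      simp [h, hp]
    · simp [h]
  have : pvDl read seed (m + 1) hi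
      = (pvDl read seed pos hi).filter (fun p => decide ((m + 1 : Int) ≤ p)) := by
    unfold pvDl
    rw [List.filter_filter]
    exact List.filter_congr hstep
  have hfil : List.filter (fun p => decide ((m + 1 : Int) ≤ p)) rest = rest :=
    List.filter_eq_self.2 (fun b hb => by
      have := hrest b hb
      simp only [decide_eq_true_eq]
      omega)
  rw [this, hd, List.filter_cons, if_neg (by simp), hfil]

theorem pvDl_self_mem (read : String) (seed pos t : Int) (h0 : 0 ≤ pos) (h1 : pos ≤ t) :
    t ∈ pvDl read seed pos t :=
  (pv_mem_dl read seed pos t t).2 ⟨by omega, le_rfl, h1, pvGood_self read seed t⟩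

-- ---------- Python's min on the window tuples ----------

def pvBeats (a b : String × Int) : Bool :=
  decide (a.1 < b.1) || !decide (b.1 < a.1) && decide (a.2 < b.2)

theorem pv_min2_cons_cons (a b : String × Int) (t : List (String × Int)) :
    PySem.List.min2? (a :: b :: t) Prod.fst Prod.snd
      = PySem.List.min2? ((if pvBeats b a = true then b else a) :: t) Prod.fst Prod.snd := by
  show List.foldl _ (some a) (b :: t)
      = List.foldl _ (some (if pvBeats b a = true then b else a)) t
  rw [List.foldl_cons]
  congr 1
  show (if (decide (b.1 < a.1) || !decide (a.1 < b.1) && decide (b.2 < a.2)) = true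
      then some b else some a) = some (if pvBeats b a = true then b else a)
  by_cases hcond : pvBeats b a = true
  · rw [if_pos hcond,
      if_pos (show (decide (b.1 < a.1) || !decide (a.1 < b.1) && decide (b.2 < a.2)) = true
        from hcond)]
  · rw [if_neg hcond,
      if_neg (show ¬ (decide (b.1 < a.1) || !decide (a.1 < b.1) && decide (b.2 < a.2)) = true
        from hcond)]

theorem pv_min2_aux (m : String × Int) :
    ∀ (t : List (String × Int)) (c : String × Int),
      (c = m ∨ (pvBeats m c = true ∧ pvBeats c m = false)) →
      (∀ y ∈ t, y = m ∨ (pvBeats m y = true ∧ pvBeats y m = false)) →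
      (m ∈ t ∨ c = m) →
      PySem.List.min2? (c :: t) Prod.fst Prod.snd = some m := by
  intro t
  induction t with
  | nil =>
    intro c _ _ hmem
    rcases hmem with hmem | rfl
    · exact absurd hmem (List.not_mem_nil)
    · rfl
  | cons x t ih =>
    intro c hc hall hmem
    have hx := hall x (by simp)
    rw [pv_min2_cons_cons c x t]
    have key : ∃ d, (if pvBeats x c = true then x else c) = d ∧
        (d = m ∨ (pvBeats m d = true ∧ pvBeats d m = false)) ∧ (m ∈ t ∨ d = m) := by
      by_cases hcond : pvBeats x c = true
      · refine ⟨x, by rw [if_pos hcond], hx, ?_⟩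
        by_cases hxm : x = m
        · exact Or.inr hxm
        · rcases hmem with hmem | rfl
          · rcases List.mem_cons.1 hmem with heq | hmem2
            · exact absurd heq.symm hxm
            · exact Or.inl hmem2
          · rcases hx with heq | ⟨_, hx2⟩
            · exact absurd heq hxm
            · rw [hx2] at hcond; exact absurd hcond (by simp)
      · refine ⟨c, by rw [if_neg hcond], hc, ?_⟩
        by_cases hcm : c = m
        · exact Or.inr hcm
        · rcases hmem with hmem | rfl
          · rcases List.mem_cons.1 hmem with heq | hmem2
            · rcases hc with heq2 | ⟨hc1, _⟩
              · exact absurd heq2 hcm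
              · rw [heq] at hc1; exact absurd hc1 hcond
            · exact Or.inl hmem2
          · exact absurd rfl hcm
    obtain ⟨d, hd, hdp, hdm⟩ := key
    rw [hd]
    exact ih d hdp (fun y hy => hall y (List.mem_cons_of_mem x hy)) hdm

theorem pv_min2_eq (l : List (String × Int)) (m : String × Int) (hm : m ∈ l)
    (h : ∀ y ∈ l, y = m ∨ (pvBeats m y = true ∧ pvBeats y m = false)) :
    PySem.List.min2? l Prod.fst Prod.snd = some m := by
  cases l with
  | nil => exact absurd hm (List.not_mem_nil)
  | cons x t =>
    have hmem : m ∈ t ∨ x = m := by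
      rcases List.mem_cons.1 hm with heq | hmem2
      · exact Or.inr heq.symm
      · exact Or.inl hmem2
    exact pv_min2_aux m t x (h x (by simp)) (fun y hy => h y (List.mem_cons_of_mem x hy)) hmem

theorem pv_min2_windows (read : String) (seed pos cnt m : Int) (rest : List Int)
    (h0 : 0 ≤ pos)
    (hd : pvDl read seed pos (pos + cnt - 1) = m :: rest) :
    PySem.List.min2? (pvWindows read seed pos cnt) Prod.fst Prod.snd
      = some (pvSubs read seed m, m - pos) := by
  have hm := (pv_mem_dl read seed pos (pos + cnt - 1) m).1 (by rw [hd]; simp)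
  have hstrict := pv_strict_left read seed pos (pos + cnt - 1) m rest h0 hd
  have hgood := (pvGood_iff read seed (pos + cnt - 1) m).1 hm.2.2.2
  have hwin : pvWindows read seed pos cnt
      = (PySem.List.pyRange 0 cnt 1).map (fun j => (pvSubs read seed (pos + j), j)) := rfl
  rw [hwin]
  apply pv_min2_eq
  · refine List.mem_map.2 ⟨m - pos, PySem.List.mem_pyRange_one.2 ⟨by omega, by omega⟩, ?_⟩
    rw [show pos + (m - pos) = m from by ring]
  · intro y hy
    obtain ⟨j, hj, rfl⟩ := List.mem_map.1 hy
    have hjr := PySem.List.mem_pyRange_one.1 hj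
    rcases lt_trichotomy (pos + j) m with hq | hq | hq
    · have hs := hstrict (pos + j) (by omega) hq
      exact Or.inr ⟨by simp [pvBeats, hs], by simp [pvBeats, hs, lt_asymm hs]⟩
    · left
      have h1 : j = m - pos := by omega
      subst h1
      rw [show pos + (m - pos) = m from by ring]
    · have hle : pvSubs read seed m ≤ pvSubs read seed (pos + j) := hgood (pos + j) hq (by omega)
      rcases lt_or_eq_of_le hle with hlt | heq
      · exact Or.inr ⟨by simp [pvBeats, hlt], by simp [pvBeats, hlt, lt_asymm hlt]⟩
      · refine Or.inr ⟨?_, ?_⟩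
        · simp [pvBeats, ← heq, show m - pos < j from by omega]
        · simp [pvBeats, ← heq, show ¬ (j < m - pos) from by omega]

-- ---------- the two minimiser loops agree ----------

theorem pv_loops_eq (read : String) (seed win : Int) (hcnt : 1 ≤ win - seed + 1) :
    ∀ (fuel : Nat) (pos hi : Int) (dq : List Int) (mins : List String),
      0 ≤ pos → pos - 1 ≤ hi → hi ≤ pos + (win - seed + 1) - 2 →
      dq = pvDl read seed pos hi →
      pvFreqLoop read seed win fuel pos mins = pvDeqLoop read seed win fuel pos dq hi mins := by
  intro fuel
  induction fuel with
  | zero => intro pos hi dq mins _ _ _ _; rfl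
  | succ fuel ih =>
    intro pos hi dq mins h0 h1 h2 hdq
    by_cases hlim : pos < PySem.Str.len read - win + 1
    · have hfill := pvFill_dl read seed (pos + (win - seed + 1) - 1) pos
        ((pos + (win - seed + 1) - 1) - hi).toNat hi dq (by omega) rfl hdq (by omega) (by omega)
      have hmem := pvDl_self_mem read seed pos (pos + (win - seed + 1) - 1) h0 (by omega)
      obtain ⟨m, rest, hd⟩ : ∃ m rest,
          pvDl read seed pos (pos + (win - seed + 1) - 1) = m :: rest := by
        cases hcase : pvDl read seed pos (pos + (win - seed + 1) - 1) with
        | nil => rw [hcase] at hmem; exact absurd hmem (List.not_mem_nil)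
        | cons a b => exact ⟨a, b, rfl⟩
      have hmin := pv_min2_windows read seed pos (win - seed + 1) m rest h0 hd
      have hm := (pv_mem_dl read seed pos (pos + (win - seed + 1) - 1) m).1 (by rw [hd]; simp)
      have hm1 := hm.2.1
      have hm2 := hm.2.2.1
      simp only [pvFreqLoop, pvDeqLoop]
      rw [if_pos hlim, if_pos hlim, hmin, hfill, hd]
      dsimp only
      rw [show pos + (m - pos) + 1 = m + 1 from by ring]
      exact ih (m + 1) (pos + (win - seed + 1) - 1) rest (mins ++ [pvSubs read seed m])
        (by omega) (by omega) (by omega) (pvDl_pop read seed pos _ m rest hd)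
    · simp only [pvFreqLoop, pvDeqLoop]
      rw [if_neg hlim, if_neg hlim]

theorem pv_mins_eq (read : String) (seed win : Int)
    (h : seed ≤ win ∨ PySem.Str.len read < win) :
    pvFreqLoop read seed win (PySem.Str.len read - win + 1).toNat 0 []
      = pvDeqLoop read seed win (PySem.Str.len read - win + 1).toNat 0 [] (-1) [] := by
  by_cases hl : PySem.Str.len read - win + 1 ≤ 0
  · rw [Int.toNat_of_nonpos hl]; rfl
  · have hcnt : 1 ≤ win - seed + 1 := by
      rcases h with h | h
      · omega
      · exfalso; omega
    refine pv_loops_eq read seed win hcnt _ 0 (-1) [] [] le_rfl (by omega) (by omega) ?_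
    simp [pvDl, pvCand, PySem.List.pyRange_one_eq_nil (le_refl (0 : Int))]

-- ---------- assembling the per-read key and the index ----------

theorem pv_key_eq (read : String) (seed win : Int)
    (h : seed ≤ win ∨ PySem.Str.len read < win) :
    binary_minimisers (frequency_minimizer read seed win) (pvListXmers seed)
      = String.ofList (((pvKmersL seed.toNat).map String.ofList).map
          (fun k => if PySem.Set.contains (PySem.Set.ofList
              (pvDeqLoop read seed win (PySem.Str.len read - win + 1).toNat 0 [] (-1) [])) k
            then '1' else '0')) := by
  unfold frequency_minimizer
  rw [pv_binary_eq, pvListXmers_eq, pv_mins_eq read seed win h]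

theorem pv_getD_match {κ : Type} [BEq κ] (d : PySem.Dict κ (List Int)) (k : κ) (i : Int) :
    (match d.get? k with
      | some v => d.insert k (v ++ [i])
      | none => d.insert k [i]) = d.insert k (d.getD k [] ++ [i]) := by
  cases h : d.get? k <;> simp [PySem.Dict.getD, h]

-- ===== VERDICT (by name: the statement is the Claim_ definition above) =====
theorem indexation_minimisers_spec : Claim_equal_indexation_minimisers := by
  intro list_seq seed win _ hpre
  unfold Spec_indexation_minimisers indexation_minimisers indexation_minimisers_alt
  dsimp only
  congr 1
  apply PySem.List.foldl_congr_mem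
  intro acc p hp
  have hread : seed ≤ win ∨ PySem.Str.len p.2 < win := by
    rcases hpre.2 with h | h
    · exact Or.inl h
    · refine Or.inr (h p.2 ?_)
      obtain ⟨k, hk, hpk⟩ := (PySem.List.mem_enumerate_iff _ _ _).1 hp
      rw [hpk]
      exact List.getElem_mem hk
  rw [pv_key_eq p.2 seed win hread]
  exact pv_getD_match acc _ p.1
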